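-- pv_equiv track=rewrite | github.com/prothaladaj/WindowLayouter | native/tools/generate_icon.py | rounded_rect_mask
-- ===== SOURCE A (Python) =====
-- def rounded_rect_mask(size: int, left: int, top: int, right: int, bottom: int, radius: int) -> list[int]:
--     mask = [0] * (size * size)
--     radius_sq = radius * radius
--     for y in range(top, bottom):
--         for x in range(left, right):
--             dx = 0
--             dy = 0
--             if x < left + radius:
--                 dx = left + radius - x - 1
--             elif x >= right - radius:
--                 dx = x - (right - radius)
--             if y < top + radius:
--                 dy = top + radius - y - 1
--             elif y >= bottom - radius:
--                 dy = y - (bottom - radius)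
--
--             if dx * dx + dy * dy <= radius_sq:
--                 mask[y * size + x] = 1
--     return mask
-- ===== SOURCE B (Python) =====
-- def _isqrt(n: int) -> int:
--     # integer Newton iteration: floor square root of n >= 0
--     if n == 0:
--         return 0
--     x = n
--     y = (x + n // x) // 2
--     while y < x:
--         x = y
--         y = (x + n // x) // 2
--     return x
--
--
-- def rounded_rect_mask(size: int, left: int, top: int, right: int, bottom: int, radius: int) -> list[int]:
--     # Per-row span computation: one contiguous filled x-interval per row, written in bulk.
--     mask = [0] * (size * size)
--     if left >= right or top >= bottom:
--         return mask
--     radius_sq = radius * radius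
--     for y in range(top, bottom):
--         if y < top + radius:
--             dy = top + radius - y - 1
--         elif y >= bottom - radius:
--             dy = y - (bottom - radius)
--         else:
--             dy = 0
--         if dy == 0:
--             xlo, xhi = left, right
--         else:
--             rem = radius_sq - dy * dy
--             if rem < 0:
--                 continue
--             dmax = _isqrt(rem)
--             xlo = max(left, left + radius - 1 - dmax)
--             xhi = max(min(left + radius, right), min(right, right - radius + dmax + 1))
--         if xlo < xhi:
--             row = y * size
--             mask[row + xlo : row + xhi] = [1] * (xhi - xlo)
--     return mask
-- ===== Notes on version B (the rewrite author's own statement) =====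
-- stated objective: alternative
-- what changed: Instead of testing the circle condition at every pixel of the box, B computes for each row one contiguous filled x-span (via a Newton integer square root of radius_sq - dy*dy) and writes it with a single bulk slice assignment.
-- outside the precondition, e.g. on rounded_rect_mask(2, -1, 0, 1, 1, 0): A returns [1, 0, 0, 1], B returns [0, 0, 0, 1, 1, 0]
import Mathlib
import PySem

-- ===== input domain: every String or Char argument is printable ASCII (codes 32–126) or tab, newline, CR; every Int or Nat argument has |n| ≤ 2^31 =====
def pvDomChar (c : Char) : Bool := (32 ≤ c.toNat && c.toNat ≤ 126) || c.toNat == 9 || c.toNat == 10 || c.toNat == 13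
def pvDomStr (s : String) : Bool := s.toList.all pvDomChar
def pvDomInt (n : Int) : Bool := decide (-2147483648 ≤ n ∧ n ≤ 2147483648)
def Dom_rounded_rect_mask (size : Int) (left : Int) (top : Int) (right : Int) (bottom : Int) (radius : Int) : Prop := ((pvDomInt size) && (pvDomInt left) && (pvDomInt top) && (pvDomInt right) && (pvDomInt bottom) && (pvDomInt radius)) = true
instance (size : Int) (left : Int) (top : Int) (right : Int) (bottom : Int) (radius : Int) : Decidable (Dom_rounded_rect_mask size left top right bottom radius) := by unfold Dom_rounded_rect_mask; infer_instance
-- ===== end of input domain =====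

-- B replaces A's per-pixel circle test with one contiguous filled x-span per row
-- (an integer square root of radius^2 - dy^2) written by a single bulk slice assignment.

-- ===== PORT A =====
-- the straight-line dx/dy branch computation both Pythons share (A computes it inline per pixel)
def pvDelta (lo : Int) (hi : Int) (radius : Int) (v : Int) : Int :=
  if v < lo + radius then lo + radius - v - 1
  else if v ≥ hi - radius then v - (hi - radius)
  else 0

def rounded_rect_mask (size : Int) (left : Int) (top : Int) (right : Int) (bottom : Int) (radius : Int) : List Int :=
  (PySem.List.pyRange top bottom 1).foldl (fun mask y =>
    (PySem.List.pyRange left right 1).foldl (fun mask x =>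
      if pvDelta left right radius x * pvDelta left right radius x
          + pvDelta top bottom radius y * pvDelta top bottom radius y ≤ radius * radius then
        PySem.List.pySetD mask (y * size + x) 1
      else mask) mask)
    (List.replicate (size * size).toNat 0)

-- ===== PORT B =====
-- the 'while y < x' Newton loop of Source B's _isqrt
def pvNewtonGo (x : Nat) (n : Nat) : Nat :=
  let y := (x + n / x) / 2
  if y < x then pvNewtonGo y n else x
termination_by x

-- _isqrt of Source B (floor square root by integer Newton iteration)
def pvIsqrt (n : Nat) : Nat :=
  if n = 0 then 0 else pvNewtonGo n n

-- the per-row span computation of Source B (none = the 'continue' when rem < 0)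
def pvRowSpan (left : Int) (right : Int) (radius : Int) (dy : Int) : Option (Int × Int) :=
  if dy = 0 then some (left, right)
  else
    let rem := radius * radius - dy * dy
    if rem < 0 then none
    else
      let dmax : Int := (pvIsqrt rem.toNat : Int)
      some (max left (left + radius - 1 - dmax),
            max (min (left + radius) right) (min right (right - radius + dmax + 1)))

def rounded_rect_mask_alt (size : Int) (left : Int) (top : Int) (right : Int) (bottom : Int) (radius : Int) : List Int :=
  if left ≥ right ∨ top ≥ bottom then List.replicate (size * size).toNat 0 else
  (PySem.List.pyRange top bottom 1).foldl (fun mask y =>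
    match pvRowSpan left right radius (pvDelta top bottom radius y) with
    | none => mask
    | some (xlo, xhi) =>
      if xlo < xhi then
        PySem.List.slice mask none (some (y * size + xlo)) ++
        PySem.List.pyRepeat [1] (xhi - xlo) ++
        PySem.List.slice mask (some (y * size + xhi)) none
      else mask)
    (List.replicate (size * size).toNat 0)

-- ===== PRECONDITION & SPEC =====
-- Pre_ excludes inputs whose nonempty pixel box sticks out of the size×size buffer: there A
-- either raises IndexError or writes through Python's negative-index wraparound, an accident
-- of flat-buffer indexing (see the excluded example in the claim).
def Pre_rounded_rect_mask (size : Int) (left : Int) (top : Int) (right : Int) (bottom : Int) (radius : Int) : Prop :=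
  bottom ≤ top ∨ right ≤ left ∨ (0 ≤ left ∧ 0 ≤ top ∧ right ≤ size ∧ bottom ≤ size)
instance (size : Int) (left : Int) (top : Int) (right : Int) (bottom : Int) (radius : Int) : Decidable (Pre_rounded_rect_mask size left top right bottom radius) := by unfold Pre_rounded_rect_mask; infer_instance

def pvWitness_rounded_rect_mask : Int × Int × Int × Int × Int × Int := (6, 1, 1, 5, 5, 2)

def Spec_rounded_rect_mask (size : Int) (left : Int) (top : Int) (right : Int) (bottom : Int) (radius : Int) (out : List Int) : Prop := out = rounded_rect_mask_alt size left top right bottom radius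
instance (size : Int) (left : Int) (top : Int) (right : Int) (bottom : Int) (radius : Int) (out : List Int) : Decidable (Spec_rounded_rect_mask size left top right bottom radius out) := by unfold Spec_rounded_rect_mask; infer_instance

-- ===== CLAIM (what is proved, stated in full; the proofs are below) =====
def Claim_equal_rounded_rect_mask : Prop := ∀ (size : Int) (left : Int) (top : Int) (right : Int) (bottom : Int) (radius : Int), Dom_rounded_rect_mask size left top right bottom radius → Pre_rounded_rect_mask size left top right bottom radius → Spec_rounded_rect_mask size left top right bottom radius (rounded_rect_mask size left top right bottom radius)

-- ===== LEMMAS AND PROOFS =====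

theorem pvWitness_ok : Dom_rounded_rect_mask 6 1 1 5 5 2 ∧ Pre_rounded_rect_mask 6 1 1 5 5 2 := by decide

-- the Newton loop keeps every integer square root candidate below x and lands on the floor sqrt
theorem pvNewtonGo_spec (n x : Nat) (hx : ∀ s, s * s ≤ n → s ≤ x) :
    pvNewtonGo x n * pvNewtonGo x n ≤ n ∧ ∀ s, s * s ≤ n → s ≤ pvNewtonGo x n := by
  induction x using Nat.strong_induction_on with
  | _ x ih =>
    unfold pvNewtonGo
    by_cases hlt : (x + n / x) / 2 < x
    · rw [if_pos hlt]
      apply ih _ hlt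
      intro s hs
      apply (Nat.le_div_iff_mul_le (by omega : 0 < 2)).mpr
      rcases Nat.eq_zero_or_pos s with hs0 | hs1
      · subst hs0; exact Nat.zero_le _
      have hsx : s ≤ x := hx s hs
      have hxpos : 0 < x := by omega
      by_cases hcase : 2 * s ≤ x
      · calc s * 2 ≤ x := by omega
          _ ≤ x + n / x := Nat.le_add_right _ _
      · have hkey : (2 * s - x) * x ≤ n := by
          have h1 : (2 * s - x) * x ≤ s * s := by
            zify [show x ≤ 2 * s by omega]
            nlinarith [sq_nonneg ((s : Int) - x)]
          omega
        have h2 : 2 * s - x ≤ n / x := (Nat.le_div_iff_mul_le hxpos).mpr hkey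
        omega
    · rw [if_neg hlt]
      refine ⟨?_, hx⟩
      rcases Nat.eq_zero_or_pos x with hx0 | hxpos
      · simp [hx0]
      have h1 : x * 2 ≤ x + n / x :=
        (Nat.le_div_iff_mul_le (by omega : 0 < 2)).mp (Nat.le_of_not_lt hlt)
      have h2 : x ≤ n / x := by omega
      exact (Nat.le_div_iff_mul_le hxpos).mp h2

-- _isqrt computes the floor square root
theorem pvIsqrt_spec (n : Nat) :
    pvIsqrt n * pvIsqrt n ≤ n ∧ n < (pvIsqrt n + 1) * (pvIsqrt n + 1) := by
  rw [pvIsqrt]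
  by_cases h0 : n = 0
  · rw [if_pos h0]; omega
  · rw [if_neg h0]
    have hx : ∀ s, s * s ≤ n → s ≤ n := by
      intro s hs
      rcases Nat.eq_zero_or_pos s with h | h
      · omega
      · calc s ≤ s * s := Nat.le_mul_of_pos_left _ h
          _ ≤ n := hs
    obtain ⟨h1, h2⟩ := pvNewtonGo_spec n n hx
    refine ⟨h1, ?_⟩
    by_contra hc
    have := h2 (pvNewtonGo n n + 1) (by omega)
    omega

-- filtering an integer range by an interval predicate
theorem pvFilterRange (a b lo hi : Int) :
    (PySem.List.pyRange a b 1).filter (fun x => decide (lo ≤ x ∧ x < hi))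
      = PySem.List.pyRange (max a lo) (min b hi) 1 := by
  by_cases hab : b ≤ a
  · rw [PySem.List.pyRange_one_eq_nil hab, PySem.List.pyRange_one_eq_nil (by omega)]
    rfl
  · rw [Int.not_le] at hab
    obtain ⟨k, hkeq⟩ : ∃ k : Nat, b - a = (k : Int) := ⟨(b - a).toNat, by omega⟩
    induction k generalizing a with
    | zero => omega
    | succ k ih =>
      rw [PySem.List.pyRange_one_cons hab, List.filter_cons]
      have htail : (PySem.List.pyRange (a+1) b 1).filter (fun x => decide (lo ≤ x ∧ x < hi))
          = PySem.List.pyRange (max (a+1) lo) (min b hi) 1 := by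
        by_cases hka : a + 1 < b
        · exact ih (a + 1) hka (by omega)
        · rw [PySem.List.pyRange_one_eq_nil (by omega), PySem.List.pyRange_one_eq_nil (by omega)]
          rfl
      rw [htail]
      by_cases hc : lo ≤ a ∧ a < hi
      · simp only [hc, decide_true, and_self, if_true]
        rw [show max (a+1) lo = a + 1 by omega, show max a lo = a by omega,
          ← PySem.List.pyRange_one_cons (by omega)]
      · simp only [decide_eq_true_eq, hc, if_false]
        by_cases hal : a < lo
        · congr 1
          omega
        · rw [PySem.List.pyRange_one_eq_nil (by omega), PySem.List.pyRange_one_eq_nil (by omega)]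

-- bulk-setting a contiguous index range equals folding single-element writes over it
theorem pvSetRange (n : Nat) (base lo : Int) (mask : List Int)
    (h0 : 0 ≤ base + lo) (hn : base + lo + n ≤ (mask.length : Int)) :
    (PySem.List.pyRange lo (lo + n) 1).foldl (fun m x => PySem.List.pySetD m (base + x) 1) mask
      = mask.take (base + lo).toNat ++ List.replicate n 1 ++ mask.drop ((base + lo).toNat + n) := by
  induction n with
  | zero =>
    rw [show lo + (0:Nat) = lo by omega, PySem.List.pyRange_one_eq_nil le_rfl]
    simp
  | succ n ih =>
    have hk : (base + lo).toNat + n < mask.length := by omega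
    rw [show lo + ((n+1 : Nat) : Int) = (lo + n) + 1 by push_cast; ring,
      PySem.List.pyRange_one_succ_right (by omega), List.foldl_append]
    rw [ih (by omega)]
    simp only [List.foldl_cons, List.foldl_nil]
    rw [PySem.List.pySetD_of_nonneg _ _ (show (0:Int) ≤ base + (lo + (n:Int)) by omega)]
    have hlt : (base + (lo + ↑n)).toNat = (base + lo).toNat + n := by omega
    rw [hlt]
    have hlen1 : (mask.take (base + lo).toNat).length = (base + lo).toNat := by
      rw [List.length_take]; omega
    have hlen2 : (mask.take (base + lo).toNat ++ List.replicate n 1).length = (base + lo).toNat + n := by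
      simp [hlen1]
    rw [List.set_append_right _ _ (le_of_eq hlen2), hlen2, Nat.sub_self]
    rw [List.drop_eq_getElem_cons hk]
    simp only [List.set_cons_zero]
    rw [List.replicate_succ']
    simp [List.append_assoc]
    omega

-- A's inner loop, when its fill condition is equivalent to an interval, is a bulk write
theorem pvRowA (p : Int → Prop) [DecidablePred p] (base a b xlo xhi : Int) (mask : List Int)
    (hal : a ≤ xlo) (hhb : xhi ≤ b)
    (hiff : ∀ x, a ≤ x → x < b → (p x ↔ xlo ≤ x ∧ x < xhi))
    (h0 : 0 ≤ base + xlo) (hlen : base + xhi ≤ (mask.length : Int)) :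
    (PySem.List.pyRange a b 1).foldl (fun m x => if p x then PySem.List.pySetD m (base + x) 1 else m) mask
      = if xlo < xhi then
          PySem.List.slice mask none (some (base + xlo)) ++ PySem.List.pyRepeat [1] (xhi - xlo)
            ++ PySem.List.slice mask (some (base + xhi)) none
        else mask := by
  have hcongr : (PySem.List.pyRange a b 1).foldl
      (fun m x => if p x then PySem.List.pySetD m (base + x) 1 else m) mask
      = (PySem.List.pyRange a b 1).foldl
      (fun m x => if xlo ≤ x ∧ x < xhi then PySem.List.pySetD m (base + x) 1 else m) mask := by
    apply PySem.List.foldl_congr_mem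
    intro acc x hx
    rw [PySem.List.mem_pyRange_one] at hx
    by_cases hc : p x
    · rw [if_pos hc, if_pos ((hiff x hx.1 hx.2).mp hc)]
    · rw [if_neg hc, if_neg (fun hw => hc ((hiff x hx.1 hx.2).mpr hw))]
  rw [hcongr, PySem.List.foldl_ite_eq_foldl_filter, pvFilterRange,
    show max a xlo = xlo by omega, show min b xhi = xhi by omega]
  by_cases hlh : xlo < xhi
  · rw [if_pos hlh]
    have hset := pvSetRange (xhi - xlo).toNat base xlo mask h0 (by omega)
    rw [show xlo + ((xhi - xlo).toNat : Int) = xhi by omega] at hset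
    rw [hset, PySem.List.slice_to mask h0, PySem.List.slice_from mask (show (0:Int) ≤ base + xhi by omega),
      PySem.List.pyRepeat_singleton, show (base + xhi).toNat = (base + xlo).toNat + (xhi - xlo).toNat by omega]
  · rw [if_neg hlh, PySem.List.pyRange_one_eq_nil (by omega), List.foldl_nil]

-- on a row inside the box, dy is nonnegative and can only be nonzero when radius ≥ 2
theorem pvDelta_facts (top bottom radius y : Int) (hty : top ≤ y) (hyb : y < bottom) :
    0 ≤ pvDelta top bottom radius y ∧ (pvDelta top bottom radius y ≠ 0 → 2 ≤ radius) := by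
  unfold pvDelta
  split_ifs <;> omega

-- the span computed by B characterises A's per-pixel fill condition
theorem pvSpan_iff (left right radius dy : Int) (hdy : 0 ≤ dy)
    (hrad : dy ≠ 0 → 2 ≤ radius) (xlo xhi : Int)
    (hspan : pvRowSpan left right radius dy = some (xlo, xhi)) :
    left ≤ xlo ∧ xhi ≤ right ∧
      ∀ x, left ≤ x → x < right →
        (pvDelta left right radius x * pvDelta left right radius x + dy * dy ≤ radius * radius
          ↔ xlo ≤ x ∧ x < xhi) := by
  by_cases h0 : dy = 0
  · rw [pvRowSpan, if_pos h0] at hspan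
    injection hspan with hsp
    injection hsp with h1 h2
    subst h1; subst h2; subst h0
    refine ⟨le_refl _, le_refl _, ?_⟩
    intro x hx1 hx2
    simp only [mul_zero, add_zero]
    constructor
    · intro _; exact ⟨hx1, hx2⟩
    · intro _
      unfold pvDelta
      split_ifs with ha hb
      · nlinarith
      · nlinarith
      · nlinarith
  · rw [pvRowSpan, if_neg h0] at hspan
    simp only at hspan
    have hrad2 : 2 ≤ radius := hrad h0
    have hdy1 : 1 ≤ dy := by omega
    by_cases hrem : radius * radius - dy * dy < 0
    · rw [if_pos hrem] at hspan; exact absurd hspan (by simp)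
    · rw [if_neg hrem] at hspan
      rw [Int.not_lt] at hrem
      set rem : Int := radius * radius - dy * dy with hremdef
      set dmax : Int := ((pvIsqrt rem.toNat : Nat) : Int) with hdmax
      have hspec := pvIsqrt_spec rem.toNat
      have hrn : (rem.toNat : Int) = rem := by omega
      have hd0 : 0 ≤ dmax := by positivity
      have hd1 : dmax * dmax ≤ rem := by
        rw [hdmax, ← hrn]; exact_mod_cast hspec.1
      have hd2 : rem < (dmax + 1) * (dmax + 1) := by
        rw [hdmax, ← hrn]; exact_mod_cast hspec.2
      have hbridge : ∀ d : Int, 0 ≤ d → (d * d ≤ rem ↔ d ≤ dmax) := by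
        intro d hd
        constructor
        · intro h; by_contra hc; rw [Int.not_le] at hc; nlinarith
        · intro h; nlinarith
      injection hspan with hsp
      injection hsp with h1 h2
      refine ⟨by omega, by omega, ?_⟩
      intro x hx1 hx2
      have hfill : (pvDelta left right radius x * pvDelta left right radius x + dy * dy ≤ radius * radius)
          ↔ pvDelta left right radius x ≤ dmax := by
        have hdxnn : 0 ≤ pvDelta left right radius x := by
          unfold pvDelta; split_ifs <;> omega
        rw [← hbridge _ hdxnn]
        constructor <;> intro h <;> linarith
      rw [hfill]
      unfold pvDelta
      split_ifs with ha hb <;> omega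

-- when B 'continue's, A's fill condition holds nowhere
theorem pvSpan_none (left right radius dy : Int)
    (hspan : pvRowSpan left right radius dy = none) :
    ∀ x, ¬ (pvDelta left right radius x * pvDelta left right radius x + dy * dy ≤ radius * radius) := by
  intro x hc
  rw [pvRowSpan] at hspan
  by_cases h0 : dy = 0
  · rw [if_pos h0] at hspan; exact absurd hspan (by simp)
  · rw [if_neg h0] at hspan
    simp only at hspan
    by_cases hrem : radius * radius - dy * dy < 0
    · have hdx : 0 ≤ pvDelta left right radius x * pvDelta left right radius x := mul_self_nonneg _
      linarith
    · rw [if_neg hrem] at hspan; exact absurd hspan (by simp)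

-- when the x-range is empty, B's row update is a no-op
theorem pvRowB_noop (size left top right bottom radius y : Int) (mask : List Int)
    (hrl : right ≤ left) :
    (match pvRowSpan left right radius (pvDelta top bottom radius y) with
     | none => mask
     | some (xlo, xhi) =>
       if xlo < xhi then
         PySem.List.slice mask none (some (y * size + xlo)) ++
         PySem.List.pyRepeat [1] (xhi - xlo) ++
         PySem.List.slice mask (some (y * size + xhi)) none
       else mask) = mask := by
  cases hspan : pvRowSpan left right radius (pvDelta top bottom radius y) with
  | none => rfl
  | some sp =>
    obtain ⟨xlo, xhi⟩ := sp
    rw [pvRowSpan] at hspan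
    by_cases h0 : pvDelta top bottom radius y = 0
    · rw [if_pos h0] at hspan
      injection hspan with hsp
      injection hsp with h1 h2
      simp only
      rw [if_neg (by omega)]
    · rw [if_neg h0] at hspan
      simp only at hspan
      by_cases hrem : radius * radius - pvDelta top bottom radius y * pvDelta top bottom radius y < 0
      · rw [if_pos hrem] at hspan; exact absurd hspan (by simp)
      · rw [if_neg hrem] at hspan
        injection hspan with hsp
        injection hsp with h1 h2
        simp only
        rw [if_neg (by omega)]

-- one row: A's inner loop equals B's row update
theorem pvRowEq (size left top right bottom radius y : Int) (mask : List Int)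
    (hl : 0 ≤ left) (ht : 0 ≤ top) (hr : right ≤ size) (hb : bottom ≤ size)
    (hty : top ≤ y) (hyb : y < bottom) (hlen : (mask.length : Int) = size * size) :
    (PySem.List.pyRange left right 1).foldl (fun m x =>
      if pvDelta left right radius x * pvDelta left right radius x
          + pvDelta top bottom radius y * pvDelta top bottom radius y ≤ radius * radius then
        PySem.List.pySetD m (y * size + x) 1
      else m) mask
    = (match pvRowSpan left right radius (pvDelta top bottom radius y) with
       | none => mask
       | some (xlo, xhi) =>
         if xlo < xhi then
           PySem.List.slice mask none (some (y * size + xlo)) ++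
           PySem.List.pyRepeat [1] (xhi - xlo) ++
           PySem.List.slice mask (some (y * size + xhi)) none
         else mask) := by
  by_cases hrl : right ≤ left
  · rw [PySem.List.pyRange_one_eq_nil hrl, List.foldl_nil,
      pvRowB_noop size left top right bottom radius y mask hrl]
  · rw [Int.not_le] at hrl
    have hsz : 0 < size := by omega
    obtain ⟨hdy0, hdyrad⟩ := pvDelta_facts top bottom radius y hty hyb
    cases hspan : pvRowSpan left right radius (pvDelta top bottom radius y) with
    | none =>
      simp only
      have hnone := pvSpan_none left right radius _ hspan
      rw [PySem.List.foldl_congr_mem _ _ (fun m _ => m) _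
        (fun acc x _ => by rw [if_neg (hnone x)]), PySem.List.foldl_ignore]
    | some sp =>
      obtain ⟨xlo, xhi⟩ := sp
      simp only
      obtain ⟨hlxlo, hxhir, hiff⟩ := pvSpan_iff left right radius _ hdy0 hdyrad xlo xhi hspan
      have hymul1 : 0 ≤ y * size := mul_nonneg (by omega) (by omega)
      have hymul2 : y * size ≤ (size - 1) * size :=
        mul_le_mul_of_nonneg_right (by omega) (by omega)
      have hexp : (size - 1) * size + size = size * size := by ring
      exact pvRowA _ (y * size) left right xlo xhi mask hlxlo hxhir hiff
        (by omega) (by rw [hlen]; omega)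

-- B's row update preserves the buffer length
theorem pvRowLenB (size left top right bottom radius y : Int) (mask : List Int)
    (hl : 0 ≤ left) (ht : 0 ≤ top) (hr : right ≤ size) (hb : bottom ≤ size)
    (hty : top ≤ y) (hyb : y < bottom) (hlen : (mask.length : Int) = size * size) :
    ((match pvRowSpan left right radius (pvDelta top bottom radius y) with
      | none => mask
      | some (xlo, xhi) =>
        if xlo < xhi then
          PySem.List.slice mask none (some (y * size + xlo)) ++
          PySem.List.pyRepeat [1] (xhi - xlo) ++
          PySem.List.slice mask (some (y * size + xhi)) none
        else mask : List Int)).length = mask.length := by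
  by_cases hrl : right ≤ left
  · rw [pvRowB_noop size left top right bottom radius y mask hrl]
  · rw [Int.not_le] at hrl
    have hsz : 0 < size := by omega
    obtain ⟨hdy0, hdyrad⟩ := pvDelta_facts top bottom radius y hty hyb
    cases hspan : pvRowSpan left right radius (pvDelta top bottom radius y) with
    | none => rfl
    | some sp =>
      obtain ⟨xlo, xhi⟩ := sp
      simp only
      obtain ⟨hlxlo, hxhir, _⟩ := pvSpan_iff left right radius _ hdy0 hdyrad xlo xhi hspan
      by_cases hlh : xlo < xhi
      · rw [if_pos hlh]
        have hymul1 : 0 ≤ y * size := mul_nonneg (by omega) (by omega)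
        have hymul2 : y * size ≤ (size - 1) * size :=
          mul_le_mul_of_nonneg_right (by omega) (by omega)
        have hexp : (size - 1) * size + size = size * size := by ring
        rw [PySem.List.slice_to mask (by omega),
          PySem.List.slice_from mask (show (0:Int) ≤ y * size + xhi by omega),
          PySem.List.pyRepeat_singleton]
        simp only [List.length_append, List.length_take, List.length_replicate, List.length_drop]
        omega
      · rw [if_neg hlh]

-- the whole outer loop, for any row list inside [top, bottom)
theorem pvOuterEq (size left top right bottom radius : Int)
    (hl : 0 ≤ left) (ht : 0 ≤ top) (hr : right ≤ size) (hb : bottom ≤ size)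
    (l : List Int) (hmem : ∀ y ∈ l, top ≤ y ∧ y < bottom) :
    ∀ mask : List Int, (mask.length : Int) = size * size →
    l.foldl (fun mask y =>
      (PySem.List.pyRange left right 1).foldl (fun m x =>
        if pvDelta left right radius x * pvDelta left right radius x
            + pvDelta top bottom radius y * pvDelta top bottom radius y ≤ radius * radius then
          PySem.List.pySetD m (y * size + x) 1
        else m) mask) mask
    = l.foldl (fun mask y =>
      match pvRowSpan left right radius (pvDelta top bottom radius y) with
      | none => mask
      | some (xlo, xhi) =>
        if xlo < xhi then
          PySem.List.slice mask none (some (y * size + xlo)) ++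
          PySem.List.pyRepeat [1] (xhi - xlo) ++
          PySem.List.slice mask (some (y * size + xhi)) none
        else mask) mask := by
  induction l with
  | nil => intro mask _; rfl
  | cons y t ih =>
    intro mask hlen
    have hy := hmem y List.mem_cons_self
    simp only [List.foldl_cons]
    rw [pvRowEq size left top right bottom radius y mask hl ht hr hb hy.1 hy.2 hlen]
    apply ih (fun z hz => hmem z (List.mem_cons_of_mem y hz))
    rw [pvRowLenB size left top right bottom radius y mask hl ht hr hb hy.1 hy.2 hlen]
    exact hlen

-- ===== VERDICT (by name: the statement is the Claim_ definition above) =====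
theorem rounded_rect_mask_spec : Claim_equal_rounded_rect_mask := by
  intro size left top right bottom radius _ hpre
  unfold Spec_rounded_rect_mask rounded_rect_mask rounded_rect_mask_alt
  by_cases hguard : left ≥ right ∨ top ≥ bottom
  · rw [if_pos hguard]
    rcases hguard with hrl | hbt
    · rw [PySem.List.foldl_congr_mem _ _ (fun m _ => m) _
        (fun acc y _ => by rw [PySem.List.pyRange_one_eq_nil hrl, List.foldl_nil]),
        PySem.List.foldl_ignore]
    · rw [PySem.List.pyRange_one_eq_nil hbt]
      rfl
  · rw [if_neg hguard]
    have h1 : left < right := by omega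
    have h2 : top < bottom := by omega
    rcases hpre with hbt | hrl | ⟨hl, ht, hr, hb⟩
    · omega
    · omega
    · apply pvOuterEq size left top right bottom radius hl ht hr hb
      · intro y hy
        rw [PySem.List.mem_pyRange_one] at hy
        exact hy
      · rw [List.length_replicate]
        have : 0 ≤ size * size := mul_self_nonneg size
        omega
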